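-- pv_equiv track=rewrite | github.com/AndreDrDre/AviationStockManagement | mgmt/views.py | convertAlpha
-- ===== SOURCE A (Python) =====
-- def convertAlpha(string):
--     char = ""
--     sum = 0
--
--     for x in string:
--         if x.isalnum():
--             char = "".join([char, x])
--
--     for x in str(char):
--         if x.isnumeric():
--             sum = sum + int(x)
--         elif x.isalpha():
--             sum = sum + ord(x)
--         else:
--             pass
--     return int(sum)
-- ===== SOURCE B (Python) =====
-- def _value(x):
--     """Contribution of one character: its digit value, its ordinal, or 0."""
--     if x.isnumeric():
--         return int(x)
--     if x.isalpha():
--         return ord(x)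
--     return 0
--
-- def convertAlpha(string):
--     return sum(map(_value, string))
-- ===== Notes on version B (the rewrite author's own statement) =====
-- stated objective: faster
-- what changed: Maps each character to a per-character contribution (digit value, ordinal, or nothing) and sums the map in one pass, instead of first building an intermediate filtered string by repeated str.join concatenation (quadratic) and then a second branching accumulation pass.
import Mathlib
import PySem

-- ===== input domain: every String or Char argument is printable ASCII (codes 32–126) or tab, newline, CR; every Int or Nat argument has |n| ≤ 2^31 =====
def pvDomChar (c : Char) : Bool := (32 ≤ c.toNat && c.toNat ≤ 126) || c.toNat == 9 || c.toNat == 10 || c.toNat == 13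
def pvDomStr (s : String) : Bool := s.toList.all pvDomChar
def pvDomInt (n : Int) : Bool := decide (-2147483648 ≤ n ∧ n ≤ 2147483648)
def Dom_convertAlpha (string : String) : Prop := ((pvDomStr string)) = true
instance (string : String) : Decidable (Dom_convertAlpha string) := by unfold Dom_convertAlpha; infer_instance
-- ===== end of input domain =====

-- B maps each character to its contribution and sums, instead of A's filter-then-accumulate two-pass scheme; objective: faster (no quadratic intermediate string).

-- ===== PORT A =====
-- x.isnumeric() is ported as PySem.Chars.isdigit: on the printable-ASCII domain the two coincide
-- (the only ASCII numeric characters are '0'..'9'); likewise int(x) on such a digit is x.toNat - 48.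
def convertAlpha (string : String) : Int :=
  let char : List Char :=
    string.toList.foldl (fun acc x => if PySem.Chars.isalnum x then acc ++ [x] else acc) []
  char.foldl
    (fun s x =>
      if PySem.Chars.isdigit x then s + ((x.toNat : Int) - 48)
      else if PySem.Chars.isalpha x then s + (x.toNat : Int)
      else s) 0

-- ===== PORT B =====
-- helper _value from Source B
def pvValue (x : Char) : Int :=
  if PySem.Chars.isdigit x then (x.toNat : Int) - 48
  else if PySem.Chars.isalpha x then (x.toNat : Int)
  else 0

def convertAlpha_alt (string : String) : Int :=
  (string.toList.map pvValue).sum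

-- ===== PRECONDITION & SPEC =====
def Spec_convertAlpha (string : String) (out : Int) : Prop := out = convertAlpha_alt string
instance (string : String) (out : Int) : Decidable (Spec_convertAlpha string out) := by unfold Spec_convertAlpha; infer_instance

-- ===== CLAIM =====
def Claim_equal_convertAlpha : Prop := ∀ (string : String), Dom_convertAlpha string → Spec_convertAlpha string (convertAlpha string)

-- ===== LEMMAS AND PROOFS =====

theorem pvFilterFold (l : List Char) (acc : List Char) :
    l.foldl (fun a x => if PySem.Chars.isalnum x then a ++ [x] else a) acc
      = acc ++ l.filter PySem.Chars.isalnum := by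
  induction l generalizing acc with
  | nil => simp
  | cons x xs ih =>
    simp only [List.foldl_cons, List.filter_cons]
    by_cases h : PySem.Chars.isalnum x <;> simp [h, ih]

-- A's second pass over any list equals the sum of pvValue, shifted by the accumulator
theorem pvFoldSum (l : List Char) (s : Int) :
    l.foldl
      (fun s x =>
        if PySem.Chars.isdigit x then s + ((x.toNat : Int) - 48)
        else if PySem.Chars.isalpha x then s + (x.toNat : Int)
        else s) s = s + (l.map pvValue).sum := by
  induction l generalizing s with
  | nil => simp
  | cons x xs ih =>
    simp only [List.foldl_cons, List.map_cons, List.sum_cons]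
    by_cases hd : PySem.Chars.isdigit x
    · simp [pvValue, hd, ih]; ring
    · by_cases ha : PySem.Chars.isalpha x
      · simp [pvValue, hd, ha, ih]; ring
      · simp [pvValue, hd, ha, ih]

-- non-alnum characters contribute 0, so filtering does not change the sum
theorem pvFilterSum (l : List Char) :
    ((l.filter PySem.Chars.isalnum).map pvValue).sum = (l.map pvValue).sum := by
  induction l with
  | nil => rfl
  | cons x xs ih =>
    simp only [List.filter_cons]
    by_cases h : PySem.Chars.isalnum x
    · simp [h, ih]
    · have hd : PySem.Chars.isdigit x = false := by
        cases hd : PySem.Chars.isdigit x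
        · rfl
        · exact absurd (by simp [PySem.Chars.isalnum, hd]) h
      have ha : PySem.Chars.isalpha x = false := by
        cases ha : PySem.Chars.isalpha x
        · rfl
        · exact absurd (by simp [PySem.Chars.isalnum, ha]) h
      simp [h, pvValue, hd, ha, ih]

-- ===== VERDICT =====
theorem convertAlpha_spec : Claim_equal_convertAlpha := by
  intro string _
  show convertAlpha string = convertAlpha_alt string
  unfold convertAlpha convertAlpha_alt
  rw [pvFilterFold, pvFoldSum]
  simpa using pvFilterSum string.toList
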